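-- pv_equiv track=rewrite | github.com/FoulSpark/Advanced-MCP-Server-for-Intelligent-Code-Completion | semantic_search.py | find_related_files
-- ===== SOURCE A (Python) =====
-- from typing import List, Dict, Any, Tuple
--
-- def find_related_files(file_path: str, file_index: Dict[str, Any],
--                       top_k: int = 5) -> List[str]:
--     """Find files related to a given file based on dependencies"""
--
--     if file_path not in file_index:
--         return []
--
--     file_data = file_index[file_path]
--     related_files = set()
--
--     # Add direct dependencies
--     for dep in file_data.get('dependencies', []):
--         # Try to find the actual file path
--         for indexed_file in file_index.keys():
--             if dep in indexed_file or indexed_file.endswith(f"{dep}.py") or indexed_file.endswith(f"{dep}.js"):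
--                 related_files.add(indexed_file)
--
--     # Find files that import this file
--     for other_file, other_data in file_index.items():
--         if other_file == file_path:
--             continue
--
--         for dep in other_data.get('dependencies', []):
--             if file_path in dep or dep in file_path:
--                 related_files.add(other_file)
--
--     return list(related_files)[:top_k]
-- ===== SOURCE B (Python) =====
-- from typing import List, Dict, Any
--
--
-- def find_related_files(file_path: str, file_index: Dict[str, Any],
--                        top_k: int = 5) -> List[str]:
--     """Single deterministic pass over file_index: each indexed file is tested
--     once against the target's dependencies and once for importing the target,
--     collected in index order (no set)."""
--     if file_path not in file_index:
--         return []
--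
--     deps = file_index[file_path].get('dependencies', [])
--     related = []
--     for other_file, other_data in file_index.items():
--         hit = any(dep in other_file
--                   or other_file.endswith(dep + ".py")
--                   or other_file.endswith(dep + ".js")
--                   for dep in deps) \
--             or (other_file != file_path
--                 and any(file_path in dep or dep in file_path
--                         for dep in other_data.get('dependencies', [])))
--         if hit:
--             related.append(other_file)
--     return related[:top_k]
-- ===== Notes on version B (the rewrite author's own statement) =====
-- stated objective: simpler
-- what changed: Replaces A's two nested scans that accumulate into a hash-ordered Python set by one deterministic pass over file_index.items() testing each file against both criteria and appending in index order.
import Mathlib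
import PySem

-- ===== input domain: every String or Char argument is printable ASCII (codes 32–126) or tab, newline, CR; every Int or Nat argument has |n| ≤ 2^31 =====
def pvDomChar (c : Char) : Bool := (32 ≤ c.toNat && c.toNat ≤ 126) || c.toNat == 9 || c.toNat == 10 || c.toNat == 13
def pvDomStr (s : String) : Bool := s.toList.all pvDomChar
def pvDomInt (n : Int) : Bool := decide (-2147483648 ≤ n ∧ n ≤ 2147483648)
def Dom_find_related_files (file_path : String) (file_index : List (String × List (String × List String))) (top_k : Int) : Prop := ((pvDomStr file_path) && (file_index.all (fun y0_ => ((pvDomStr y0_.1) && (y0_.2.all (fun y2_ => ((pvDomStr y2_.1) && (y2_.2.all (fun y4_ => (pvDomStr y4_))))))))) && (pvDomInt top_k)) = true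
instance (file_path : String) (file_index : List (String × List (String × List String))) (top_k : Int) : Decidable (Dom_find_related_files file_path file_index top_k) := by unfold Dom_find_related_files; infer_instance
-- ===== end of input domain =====

-- B replaces A's two nested scans into a hash-ordered set by one deterministic pass
-- over the index collecting matches in index order (objective: simpler).
-- Equality is claimed on Pre_, where the result has at most one element, so that
-- A's set-iteration output order plays no role.

-- ===== PORT A =====
def find_related_files (file_path : String) (file_index : List (String × List (String × List String))) (top_k : Int) : List String :=
  let d := PySem.Dict.ofList file_index
  if !(d.contains file_path) then []
  else
    let file_data := d.getD file_path []
    let deps := PySem.Dict.getD (PySem.Dict.ofList file_data) "dependencies" []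
    -- for dep in …: for indexed_file in file_index.keys(): if …: related_files.add(indexed_file)
    let s1 : PySem.Set String := deps.foldl (fun acc dep =>
      d.keys.foldl (fun acc2 indexed_file =>
        if PySem.Str.isIn dep indexed_file
            || PySem.Str.endswith indexed_file (dep ++ ".py")
            || PySem.Str.endswith indexed_file (dep ++ ".js")
        then PySem.Set.add acc2 indexed_file else acc2) acc) PySem.Set.empty
    -- for other_file, other_data in file_index.items(): …
    let s2 : PySem.Set String := d.items.foldl (fun acc other =>
      if other.1 == file_path then acc
      else (PySem.Dict.getD (PySem.Dict.ofList other.2) "dependencies" []).foldl (fun acc2 dep =>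
        if PySem.Str.isIn file_path dep || PySem.Str.isIn dep file_path
        then PySem.Set.add acc2 other.1 else acc2) acc) s1
    PySem.List.slice s2 none (some top_k)

-- ===== PORT B =====
-- is_related(other_file, other_data) from Source B
def pvIsRelated (file_path : String) (deps : List String) (other : String × List (String × List String)) : Bool :=
  deps.any (fun dep => PySem.Str.isIn dep other.1
      || PySem.Str.endswith other.1 (dep ++ ".py")
      || PySem.Str.endswith other.1 (dep ++ ".js"))
  || (other.1 != file_path
      && (PySem.Dict.getD (PySem.Dict.ofList other.2) "dependencies" []).any
           (fun dep => PySem.Str.isIn file_path dep || PySem.Str.isIn dep file_path))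

def find_related_files_alt (file_path : String) (file_index : List (String × List (String × List String))) (top_k : Int) : List String :=
  let d := PySem.Dict.ofList file_index
  if !(d.contains file_path) then []
  else
    let deps := PySem.Dict.getD (PySem.Dict.ofList (d.getD file_path [])) "dependencies" []
    -- [f for f, data in file_index.items() if is_related(f, data)]
    let related := (d.items.filter (fun other => pvIsRelated file_path deps other)).map Prod.fst
    PySem.List.slice related none (some top_k)

-- ===== PRECONDITION & SPEC =====
-- Pre_ excludes inputs on which the looked-up file is present and MORE THAN ONE indexed
-- file matches the relatedness criteria: there A returns list(set)[:top_k], whose element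
-- order (and hence the top_k truncation) is CPython's hash-seed-dependent set iteration
-- order — an accidental order no implementation should be required to match.
def Pre_find_related_files (file_path : String) (file_index : List (String × List (String × List String))) (top_k : Int) : Prop :=
  (PySem.Dict.contains (PySem.Dict.ofList file_index) file_path = false) ∨
  (((PySem.Dict.ofList file_index).items.filter
      (fun other => pvIsRelated file_path
        (PySem.Dict.getD (PySem.Dict.ofList ((PySem.Dict.ofList file_index).getD file_path [])) "dependencies" []) other)).length ≤ 1)
instance (file_path : String) (file_index : List (String × List (String × List String))) (top_k : Int) : Decidable (Pre_find_related_files file_path file_index top_k) := by unfold Pre_find_related_files; infer_instance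

def pvWitness_find_related_files : String × (List (String × List (String × List String))) × Int :=
  ("a.py", [("a.py", [("dependencies", ["m"])]), ("m.py", [])], 5)

def Spec_find_related_files (file_path : String) (file_index : List (String × List (String × List String))) (top_k : Int) (out : List String) : Prop := out = find_related_files_alt file_path file_index top_k
instance (file_path : String) (file_index : List (String × List (String × List String))) (top_k : Int) (out : List String) : Decidable (Spec_find_related_files file_path file_index top_k out) := by unfold Spec_find_related_files; infer_instance

-- ===== CLAIM (what is proved, stated in full; the proofs are below) =====
def Claim_equal_find_related_files : Prop := ∀ (file_path : String) (file_index : List (String × List (String × List String))) (top_k : Int), Dom_find_related_files file_path file_index top_k → Pre_find_related_files file_path file_index top_k → Spec_find_related_files file_path file_index top_k (find_related_files file_path file_index top_k)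

-- ===== LEMMAS AND PROOFS =====

-- membership in an "add k when cond k" fold
theorem pv_mem_foldl_add_if (x : String) (cond : String → Bool) (l : List String) (acc : PySem.Set String) :
    x ∈ l.foldl (fun a k => if cond k then PySem.Set.add a k else a) acc ↔
      x ∈ acc ∨ (x ∈ l ∧ cond x = true) := by
  induction l generalizing acc with
  | nil => simp
  | cons h t ih =>
    simp only [List.foldl_cons, ih, List.mem_cons]
    by_cases hc : cond h = true
    · simp only [hc, if_true, PySem.Set.mem_add]
      constructor
      · rintro (⟨hx | hx⟩ | ⟨hm, hcx⟩)
        · exact Or.inl hx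
        · subst hx; exact Or.inr ⟨Or.inl rfl, hc⟩
        · exact Or.inr ⟨Or.inr hm, hcx⟩
      · rintro (hx | ⟨hm | hm, hcx⟩)
        · exact Or.inl (Or.inl hx)
        · subst hm; exact Or.inl (Or.inr rfl)
        · exact Or.inr ⟨hm, hcx⟩
    · simp only [hc]
      constructor
      · rintro (hx | ⟨hm, hcx⟩)
        · exact Or.inl hx
        · exact Or.inr ⟨Or.inr hm, hcx⟩
      · rintro (hx | ⟨hm | hm, hcx⟩)
        · exact Or.inl hx
        · subst hm; exact absurd hcx hc
        · exact Or.inr ⟨hm, hcx⟩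

-- membership in an "add the fixed v when cond k" fold
theorem pv_mem_foldl_add_const (x v : String) (cond : String → Bool) (l : List String) (acc : PySem.Set String) :
    x ∈ l.foldl (fun a k => if cond k then PySem.Set.add a v else a) acc ↔
      x ∈ acc ∨ (x = v ∧ ∃ k ∈ l, cond k = true) := by
  induction l generalizing acc with
  | nil => simp
  | cons h t ih =>
    simp only [List.foldl_cons, ih]
    by_cases hc : cond h = true
    · simp only [hc, if_true, PySem.Set.mem_add]
      constructor
      · rintro (⟨hx | hx⟩ | ⟨hxv, k, hk, hck⟩)
        · exact Or.inl hx
        · exact Or.inr ⟨hx, h, List.mem_cons_self, hc⟩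
        · exact Or.inr ⟨hxv, k, List.mem_cons_of_mem _ hk, hck⟩
      · rintro (hx | ⟨hxv, k, hk, hck⟩)
        · exact Or.inl (Or.inl hx)
        · exact Or.inl (Or.inr hxv)
    · simp only [hc]
      constructor
      · rintro (hx | ⟨hxv, k, hk, hck⟩)
        · exact Or.inl hx
        · exact Or.inr ⟨hxv, k, List.mem_cons_of_mem _ hk, hck⟩
      · rintro (hx | ⟨hxv, k, hk, hck⟩)
        · exact Or.inl hx
        · rcases List.mem_cons.mp hk with he | hk
          · subst he; exact absurd hck hc
          · exact Or.inr ⟨hxv, k, hk, hck⟩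

-- phase 1 of A: outer loop over deps, inner loop over keys
theorem pv_mem_phase1 (x : String) (c : String → String → Bool) (deps keys : List String) (acc : PySem.Set String) :
    x ∈ deps.foldl (fun a dep => keys.foldl (fun a2 k => if c dep k then PySem.Set.add a2 k else a2) a) acc ↔
      x ∈ acc ∨ (x ∈ keys ∧ ∃ dep ∈ deps, c dep x = true) := by
  induction deps generalizing acc with
  | nil => simp
  | cons h t ih =>
    simp only [List.foldl_cons, ih, pv_mem_foldl_add_if]
    constructor
    · rintro ((hx | ⟨hk, hcx⟩) | ⟨hk, dep, hdep, hcx⟩)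
      · exact Or.inl hx
      · exact Or.inr ⟨hk, h, List.mem_cons_self, hcx⟩
      · exact Or.inr ⟨hk, dep, List.mem_cons_of_mem _ hdep, hcx⟩
    · rintro (hx | ⟨hk, dep, hdep, hcx⟩)
      · exact Or.inl (Or.inl hx)
      · rcases List.mem_cons.mp hdep with he | hdep
        · subst he; exact Or.inl (Or.inr ⟨hk, hcx⟩)
        · exact Or.inr ⟨hk, dep, hdep, hcx⟩

-- phase 2 of A: loop over items, skipping file_path, inner loop over that item's deps
theorem pv_mem_phase2 (x fp : String) {β : Type} (g : β → List String) (c2 : String → Bool)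
    (items : List (String × β)) (acc : PySem.Set String) :
    x ∈ items.foldl (fun a o => if o.1 == fp then a
        else (g o.2).foldl (fun a2 dep => if c2 dep then PySem.Set.add a2 o.1 else a2) a) acc ↔
      x ∈ acc ∨ ∃ o ∈ items, (o.1 == fp) = false ∧ x = o.1 ∧ ∃ dep ∈ g o.2, c2 dep = true := by
  induction items generalizing acc with
  | nil => simp
  | cons h t ih =>
    simp only [List.foldl_cons]
    by_cases he : (h.1 == fp) = true
    · rw [if_pos he]
      simp only [ih]
      constructor
      · rintro (hx | ⟨o, ho, hne, hrest⟩)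
        · exact Or.inl hx
        · exact Or.inr ⟨o, List.mem_cons_of_mem _ ho, hne, hrest⟩
      · rintro (hx | ⟨o, ho, hne, hrest⟩)
        · exact Or.inl hx
        · rcases List.mem_cons.mp ho with hoe | ho
          · subst hoe; rw [he] at hne; exact absurd hne (by simp)
          · exact Or.inr ⟨o, ho, hne, hrest⟩
    · have he' : (h.1 == fp) = false := by simpa using he
      rw [if_neg he]
      simp only [ih, pv_mem_foldl_add_const]
      constructor
      · rintro ((hx | ⟨hxv, k, hk, hck⟩) | ⟨o, ho, hne, hrest⟩)
        · exact Or.inl hx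
        · exact Or.inr ⟨h, List.mem_cons_self, he', hxv, k, hk, hck⟩
        · exact Or.inr ⟨o, List.mem_cons_of_mem _ ho, hne, hrest⟩
      · rintro (hx | ⟨o, ho, hne, hrest⟩)
        · exact Or.inl (Or.inl hx)
        · rcases List.mem_cons.mp ho with hoe | ho
          · subst hoe; exact Or.inl (Or.inr ⟨hrest.1, hrest.2⟩)
          · exact Or.inr ⟨o, ho, hne, hrest⟩

-- any fold whose step preserves Nodup produces a Nodup list
theorem pv_nodup_foldl {α : Type} (f : PySem.Set String → α → PySem.Set String)
    (hf : ∀ s a, s.Nodup → (f s a).Nodup) (l : List α) (s : PySem.Set String) (hs : s.Nodup) :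
    (l.foldl f s).Nodup := by
  induction l generalizing s with
  | nil => exact hs
  | cons h t ih => exact ih _ (hf _ _ hs)

-- two Nodup lists with the same members, one of length ≤ 1, are equal
theorem pv_eq_of_len_le_one (l1 l2 : List String) (h1 : l1.Nodup) (h2 : l2.Nodup)
    (hm : ∀ x, x ∈ l1 ↔ x ∈ l2) (hl : l2.length ≤ 1) : l1 = l2 := by
  match l2, hl with
  | [], _ =>
    cases l1 with
    | nil => rfl
    | cons a t => exact absurd ((hm a).mp List.mem_cons_self) (by simp)
  | [a], _ =>
    cases l1 with
    | nil => exact absurd ((hm a).mpr List.mem_cons_self) List.not_mem_nil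
    | cons b t =>
      have hb : b = a := by simpa using (hm b).mp List.mem_cons_self
      subst hb
      have ht : t = [] := by
        cases t with
        | nil => rfl
        | cons c u =>
          have hc : c = b := by simpa using (hm c).mp (List.mem_cons_of_mem _ List.mem_cons_self)
          subst hc
          exact absurd h1 (by simp)
      rw [ht]

-- the one-pass B list equals A's two-phase set, when at most one file is related
theorem pv_core (fp : String) (d : PySem.Dict String (List (String × List String))) (deps : List String)
    (hnd : d.keys.Nodup)
    (hlen : (d.items.filter (fun o => pvIsRelated fp deps o)).length ≤ 1) :
    (d.items.foldl (fun acc other =>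
        if other.1 == fp then acc
        else (PySem.Dict.getD (PySem.Dict.ofList other.2) "dependencies" []).foldl (fun acc2 dep =>
          if PySem.Str.isIn fp dep || PySem.Str.isIn dep fp
          then PySem.Set.add acc2 other.1 else acc2) acc)
      (deps.foldl (fun acc dep =>
        d.keys.foldl (fun acc2 indexed_file =>
          if PySem.Str.isIn dep indexed_file
              || PySem.Str.endswith indexed_file (dep ++ ".py")
              || PySem.Str.endswith indexed_file (dep ++ ".js")
          then PySem.Set.add acc2 indexed_file else acc2) acc) PySem.Set.empty))
    = (d.items.filter (fun other => pvIsRelated fp deps other)).map Prod.fst := by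
  apply pv_eq_of_len_le_one
  · -- A's set is Nodup
    apply pv_nodup_foldl
    · intro s a hs
      dsimp only
      split
      · exact hs
      · apply pv_nodup_foldl _ _ _ _ hs
        intro s2 b hs2
        dsimp only
        split
        · exact PySem.Set.nodup_add _ _ hs2
        · exact hs2
    · apply pv_nodup_foldl _ _ _ _ List.nodup_nil
      intro s a hs
      dsimp only
      apply pv_nodup_foldl _ _ _ _ hs
      intro s2 b hs2
      dsimp only
      split
      · exact PySem.Set.nodup_add _ _ hs2
      · exact hs2
  · -- B's list is Nodup: it is a sublist of the (Nodup) key list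
    exact List.Nodup.sublist (List.Sublist.map Prod.fst List.filter_sublist) hnd
  · -- same members
    intro x
    rw [pv_mem_phase2 x fp (fun b => PySem.Dict.getD (PySem.Dict.ofList b) "dependencies" [])
          (fun dep => PySem.Str.isIn fp dep || PySem.Str.isIn dep fp) d.items]
    rw [pv_mem_phase1 x (fun dep k => PySem.Str.isIn dep k
          || PySem.Str.endswith k (dep ++ ".py") || PySem.Str.endswith k (dep ++ ".js")) deps d.keys]
    show _ ↔ x ∈ (d.items.filter (fun other => pvIsRelated fp deps other)).map Prod.fst
    simp only [List.mem_map, List.mem_filter, pvIsRelated, PySem.Dict.keys, List.any_eq_true,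
      Bool.or_eq_true, Bool.and_eq_true, bne_iff_ne, ne_eq, PySem.Set.empty_eq,
      List.not_mem_nil, false_or, beq_eq_false_iff_ne]
    constructor
    · rintro (⟨⟨o, ho, rfl⟩, dep, hdep, hcx⟩ | ⟨o, ho, hne, rfl, dep, hdep, hcx⟩)
      · exact ⟨o, ⟨ho, Or.inl ⟨dep, hdep, hcx⟩⟩, rfl⟩
      · exact ⟨o, ⟨ho, Or.inr ⟨hne, dep, hdep, hcx⟩⟩, rfl⟩
    · rintro ⟨o, ⟨ho, ⟨dep, hdep, hcx⟩ | ⟨hne, dep, hdep, hcx⟩⟩, rfl⟩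
      · exact Or.inl ⟨⟨o, ho, rfl⟩, dep, hdep, hcx⟩
      · exact Or.inr ⟨o, ho, hne, rfl, dep, hdep, hcx⟩
  · simpa using hlen

-- ===== VERDICT (by name: the statement is the Claim_ definition above) =====
set_option maxRecDepth 8192 in
theorem find_related_files_spec : Claim_equal_find_related_files := by
  intro fp fi tk _dom hpre
  unfold Spec_find_related_files find_related_files find_related_files_alt
  by_cases hc : (PySem.Dict.ofList fi).contains fp = true
  · simp only [hc, Bool.not_true, Bool.false_eq_true, if_false]
    rcases hpre with hpre | hlen
    · rw [hc] at hpre; exact absurd hpre (by simp)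
    · rw [pv_core fp (PySem.Dict.ofList fi)
          (PySem.Dict.getD (PySem.Dict.ofList ((PySem.Dict.ofList fi).getD fp [])) "dependencies" [])
          (PySem.Dict.nodup_keys_ofList fi) hlen]
  · have hc' : (PySem.Dict.ofList fi).contains fp = false := by simpa using hc
    simp only [hc', Bool.not_false, if_true]
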